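-- pv_equiv track=rewrite | github.com/RasaHQ/rasa | leaderboard/nlu/exp_3_plot_results.py | sort_model_names
-- ===== SOURCE A (Python) =====
-- from typing import List
--
-- def sort_model_names(model_names: List[str]) -> List[str]:
--     models_unsorted = sorted(model_names)
--     non_diet = [model for model in models_unsorted if "diet" not in model]
--     diet_wo_transformer = [
--         model for model in models_unsorted if "diet" in model and "without" in model
--     ]
--     models = non_diet + diet_wo_transformer
--     models += [model for model in models_unsorted if model not in models]
--     return models
-- ===== SOURCE B (Python) =====
-- def sort_model_names(model_names):
--     def rank(m):
--         if "diet" not in m: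
--             return 0
--         if "without" in m:
--             return 1
--         return 2
--     return sorted(sorted(model_names), key=rank)
-- ===== Notes on version B (the rewrite author's own statement) =====
-- stated objective: simpler
-- what changed: Replaces the three filter comprehensions, concatenation and quadratic membership-based dedup append with a single stable sort by a 3-valued rank applied to the name-sorted list.
import Mathlib
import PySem

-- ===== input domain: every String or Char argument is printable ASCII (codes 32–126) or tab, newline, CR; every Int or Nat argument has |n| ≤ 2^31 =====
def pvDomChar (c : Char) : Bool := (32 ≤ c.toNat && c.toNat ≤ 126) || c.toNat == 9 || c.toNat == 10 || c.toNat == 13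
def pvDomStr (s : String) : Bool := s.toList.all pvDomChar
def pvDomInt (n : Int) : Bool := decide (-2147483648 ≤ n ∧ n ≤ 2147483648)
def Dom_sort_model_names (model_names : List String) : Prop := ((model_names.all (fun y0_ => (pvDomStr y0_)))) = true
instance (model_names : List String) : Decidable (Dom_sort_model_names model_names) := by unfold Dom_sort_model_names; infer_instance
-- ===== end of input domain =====

-- B replaces A's three filter passes + membership-based dedup append with one stable sort by a 3-valued rank; objective: simpler.


-- ===== PORT A =====
def sort_model_names (model_names : List String) : List String :=
  let models_unsorted := PySem.List.sorted model_names (fun m => m) false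
  let non_diet := models_unsorted.filter (fun model => !(PySem.Str.isIn "diet" model))
  let diet_wo_transformer := models_unsorted.filter
    (fun model => PySem.Str.isIn "diet" model && PySem.Str.isIn "without" model)
  let models := non_diet ++ diet_wo_transformer
  models ++ models_unsorted.filter (fun model => !(models.contains model))

-- ===== PORT B =====
def pvRank (m : String) : Int :=
  if !(PySem.Str.isIn "diet" m) then 0
  else if PySem.Str.isIn "without" m then 1
  else 2

def sort_model_names_alt (model_names : List String) : List String :=
  PySem.List.sorted (PySem.List.sorted model_names (fun m => m) false) pvRank false

-- ===== PRECONDITION & SPEC =====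
def Spec_sort_model_names (model_names : List String) (out : List String) : Prop := out = sort_model_names_alt model_names
instance (model_names : List String) (out : List String) : Decidable (Spec_sort_model_names model_names out) := by unfold Spec_sort_model_names; infer_instance

-- ===== CLAIM (what is proved, stated in full; the proofs are below) =====
def Claim_equal_sort_model_names : Prop := ∀ (model_names : List String), Dom_sort_model_names model_names → Spec_sort_model_names model_names (sort_model_names model_names)

-- ===== LEMMAS AND PROOFS =====

-- bucket i of a list under pvRank
def pvBucket (i : Int) (ys : List String) : List String :=
  ys.filter (fun m => pvRank m == i)

theorem pvRank_tri (m : String) : pvRank m = 0 ∨ pvRank m = 1 ∨ pvRank m = 2 := by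
  unfold pvRank; split_ifs <;> simp

theorem mem_pvBucket_rank {i : Int} {ys : List String} {m : String}
    (h : m ∈ pvBucket i ys) : pvRank m = i := by
  have := List.mem_filter.mp h
  simpa using this.2

theorem pvBucket_append_singleton (i : Int) (ys : List String) (x : String) :
    pvBucket i (ys ++ [x]) = pvBucket i ys ++ (if pvRank x == i then [x] else []) := by
  by_cases h : pvRank x = i <;> simp [pvBucket, List.filter_append, h]

theorem insertBy_sandwich {α : Type} (before : α → α → Bool) (x : α) :
    ∀ (as bs : List α), (∀ a ∈ as, before x a = false) → (∀ b ∈ bs, before x b = true) →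
    PySem.List.insertBy before x (as ++ bs) = as ++ x :: bs := by
  intro as
  induction as with
  | nil =>
    intro bs _ hb
    cases bs with
    | nil => simp [PySem.List.insertBy]
    | cons b bs => simp [PySem.List.insertBy, hb b (by simp)]
  | cons a as ih =>
    intro bs ha hb
    have hax : before x a = false := ha a (by simp)
    simp only [List.cons_append, PySem.List.insertBy, hax]
    simp [ih bs (fun a' h' => ha a' (by simp [h'])) hb]

theorem insertBy_buckets (x : String) (ys : List String) :
    PySem.List.insertBy (fun a b => decide (pvRank a < pvRank b)) x
      (pvBucket 0 ys ++ pvBucket 1 ys ++ pvBucket 2 ys)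
    = pvBucket 0 (ys ++ [x]) ++ pvBucket 1 (ys ++ [x]) ++ pvBucket 2 (ys ++ [x]) := by
  rcases pvRank_tri x with hx | hx | hx
  · rw [List.append_assoc,
      insertBy_sandwich _ x (pvBucket 0 ys) (pvBucket 1 ys ++ pvBucket 2 ys)
        (by intro a ha; have := mem_pvBucket_rank ha; simp [hx, this])
        (by intro b hb; rcases List.mem_append.mp hb with h | h <;>
            · have := mem_pvBucket_rank h; simp [hx, this])]
    simp [pvBucket_append_singleton, hx]
  · rw [show pvBucket 0 ys ++ pvBucket 1 ys ++ pvBucket 2 ys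
        = (pvBucket 0 ys ++ pvBucket 1 ys) ++ pvBucket 2 ys by simp,
      insertBy_sandwich _ x (pvBucket 0 ys ++ pvBucket 1 ys) (pvBucket 2 ys)
        (by intro a ha; rcases List.mem_append.mp ha with h | h <;>
            · have := mem_pvBucket_rank h; simp [hx, this])
        (by intro b hb; have := mem_pvBucket_rank hb; simp [hx, this])]
    simp [pvBucket_append_singleton, hx]
  · rw [show pvBucket 0 ys ++ pvBucket 1 ys ++ pvBucket 2 ys
        = (pvBucket 0 ys ++ pvBucket 1 ys ++ pvBucket 2 ys) ++ [] by simp,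
      insertBy_sandwich _ x _ []
        (by intro a ha
            rcases List.mem_append.mp ha with h | h
            · rcases List.mem_append.mp h with h' | h' <;>
              · have := mem_pvBucket_rank h'; simp [hx, this]
            · have := mem_pvBucket_rank h; simp [hx, this])
        (by intro b hb; simp at hb)]
    simp [pvBucket_append_singleton, hx]

theorem foldl_insertBy_buckets :
    ∀ (xs ys : List String),
    xs.foldl (fun acc x => PySem.List.insertBy (fun a b => decide (pvRank a < pvRank b)) x acc)
      (pvBucket 0 ys ++ pvBucket 1 ys ++ pvBucket 2 ys)
    = pvBucket 0 (ys ++ xs) ++ pvBucket 1 (ys ++ xs) ++ pvBucket 2 (ys ++ xs) := by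
  intro xs
  induction xs with
  | nil => intro ys; simp
  | cons x xs ih =>
    intro ys
    simp only [List.foldl_cons, insertBy_buckets x ys]
    rw [ih (ys ++ [x])]
    simp

theorem sorted_rank_eq_buckets (s : List String) :
    PySem.List.sorted s pvRank false = pvBucket 0 s ++ pvBucket 1 s ++ pvBucket 2 s := by
  rw [PySem.List.sorted_eq_foldl_insertBy]
  have h := foldl_insertBy_buckets s []
  simpa [pvBucket] using h

theorem filter_p0_eq (s : List String) :
    s.filter (fun model => !(PySem.Str.isIn "diet" model)) = pvBucket 0 s := by
  unfold pvBucket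
  apply List.filter_congr
  intro m _
  cases h1 : PySem.Chars.isIn ['d','i','e','t'] m.toList <;>
    cases h2 : PySem.Chars.isIn ['w','i','t','h','o','u','t'] m.toList <;>
      simp [pvRank, h1, h2]

theorem filter_p1_eq (s : List String) :
    s.filter (fun model => PySem.Str.isIn "diet" model && PySem.Str.isIn "without" model)
    = pvBucket 1 s := by
  unfold pvBucket
  apply List.filter_congr
  intro m _
  cases h1 : PySem.Chars.isIn ['d','i','e','t'] m.toList <;>
    cases h2 : PySem.Chars.isIn ['w','i','t','h','o','u','t'] m.toList <;>
      simp [pvRank, h1, h2]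

theorem filter_not_mem_eq (s : List String) :
    s.filter (fun model => !((pvBucket 0 s ++ pvBucket 1 s).contains model)) = pvBucket 2 s := by
  unfold pvBucket
  apply List.filter_congr
  intro m hm
  rcases pvRank_tri m with h | h | h
  · have hmem : m ∈ pvBucket 0 s := List.mem_filter.mpr ⟨hm, by simp [h]⟩
    simp [pvBucket] at hmem
    simp [h, hm, hmem]
  · have hmem : m ∈ pvBucket 1 s := List.mem_filter.mpr ⟨hm, by simp [h]⟩
    simp [pvBucket] at hmem
    simp [h, hm, hmem]
  · have hc : (pvBucket 0 s ++ pvBucket 1 s).contains m = false := by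
      simp only [List.contains_eq_mem, List.mem_append, decide_eq_false_iff_not]
      rintro (hmem | hmem) <;>
        · have := mem_pvBucket_rank hmem; omega
    simp [hc, h]

-- ===== VERDICT (by name: the statement is the Claim_ definition above) =====
theorem sort_model_names_spec : Claim_equal_sort_model_names := by
  intro model_names _
  unfold Spec_sort_model_names sort_model_names sort_model_names_alt
  dsimp only
  set s := PySem.List.sorted model_names (fun m => m) false with hs
  rw [filter_p0_eq s, filter_p1_eq s, sorted_rank_eq_buckets s, filter_not_mem_eq s]
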